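-- pv_equiv track=rewrite | github.com/KYBee/DataStructure | assignment1/assignment_02_matrix.py | compare_same
-- ===== SOURCE A (Python) =====
-- def compare_same(i, d1, d2):
--     if d1[i] < d2[i]:
--         return 0
--     elif d1[i] > d2[i]:
--         return 1
--     elif d1[i+1] == d2[i+1]:
--         return 2
--     else:
--         return compare_same(i+1, d1, d2)
-- ===== SOURCE B (Python) =====
-- def compare_same(i, d1, d2):
--     # A's recursion is at most one level deep: it recurses only when
--     # d1[i+1] != d2[i+1], and that call returns at its first comparison.
--     # So the whole function is a flat five-way branch, no recursion needed.
--     a, b = d1[i], d2[i]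
--     if a != b:
--         return 0 if a < b else 1
--     c, d = d1[i + 1], d2[i + 1]
--     if c == d:
--         return 2
--     return 0 if c < d else 1
-- ===== Notes on version B (the rewrite author's own statement) =====
-- stated objective: simpler
-- what changed: A's recursion can only ever go one level deep (it recurses exactly when d1[i+1] != d2[i+1], and that call returns at its first check), so B replaces the recursion by a flat five-way branch with identical element-access order.
import Mathlib
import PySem

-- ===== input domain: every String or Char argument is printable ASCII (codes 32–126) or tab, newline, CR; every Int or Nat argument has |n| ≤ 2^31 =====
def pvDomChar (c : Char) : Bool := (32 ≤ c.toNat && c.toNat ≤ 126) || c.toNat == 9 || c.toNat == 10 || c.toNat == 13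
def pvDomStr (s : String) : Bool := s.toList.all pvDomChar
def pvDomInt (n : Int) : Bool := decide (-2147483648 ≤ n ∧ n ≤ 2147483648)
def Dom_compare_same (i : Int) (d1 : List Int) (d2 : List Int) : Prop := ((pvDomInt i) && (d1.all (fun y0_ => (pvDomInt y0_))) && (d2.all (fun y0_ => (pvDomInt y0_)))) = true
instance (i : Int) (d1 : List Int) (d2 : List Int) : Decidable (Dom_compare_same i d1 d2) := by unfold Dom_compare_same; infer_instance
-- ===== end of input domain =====

-- B replaces A's (at most one level deep) recursion by a flat five-way branch; objective: simpler.


-- ===== PORT A =====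
-- A is general recursion on i; ported with fuel d1.length + 2 (ample: on inputs
-- where the Python returns, the recursion depth is at most 2). Out-of-range
-- indices (where Python raises IndexError) yield the default 0, excluded by Pre_.
def compareGoA (d1 : List Int) (d2 : List Int) : Nat → Int → Int
  | 0, _ => 0
  | n + 1, i =>
    match PySem.List.pyGet? d1 i, PySem.List.pyGet? d2 i with
    | some a, some b =>
      if a < b then 0
      else if a > b then 1
      else
        match PySem.List.pyGet? d1 (i + 1), PySem.List.pyGet? d2 (i + 1) with
        | some c, some d => if c = d then 2 else compareGoA d1 d2 n (i + 1)
        | _, _ => 0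
    | _, _ => 0

def compare_same (i : Int) (d1 : List Int) (d2 : List Int) : Int :=
  compareGoA d1 d2 (d1.length + 2) i

-- ===== PORT B =====
def compare_same_alt (i : Int) (d1 : List Int) (d2 : List Int) : Int :=
  match PySem.List.pyGet? d1 i, PySem.List.pyGet? d2 i with
  | some a, some b =>
    if a ≠ b then (if a < b then 0 else 1)
    else
      match PySem.List.pyGet? d1 (i + 1), PySem.List.pyGet? d2 (i + 1) with
      | some c, some d => if c = d then 2 else (if c < d then 0 else 1)
      | _, _ => 0
  | _, _ => 0

-- ===== PRECONDITION & SPEC =====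
-- Pre_ excludes exactly the inputs on which Python A raises IndexError:
-- index i out of range, or d1[i] == d2[i] with index i+1 out of range (B raises there too).
def Pre_compare_same (i : Int) (d1 : List Int) (d2 : List Int) : Prop :=
  (PySem.List.pyGet? d1 i).isSome ∧ (PySem.List.pyGet? d2 i).isSome ∧
    (PySem.List.pyGet? d1 i = PySem.List.pyGet? d2 i →
      (PySem.List.pyGet? d1 (i + 1)).isSome ∧ (PySem.List.pyGet? d2 (i + 1)).isSome)
instance (i : Int) (d1 : List Int) (d2 : List Int) : Decidable (Pre_compare_same i d1 d2) := by
  unfold Pre_compare_same; infer_instance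

def pvWitness_compare_same : Int × List Int × List Int := (0, [3, 1, 4], [3, 1, 5])

def Spec_compare_same (i : Int) (d1 : List Int) (d2 : List Int) (out : Int) : Prop := out = compare_same_alt i d1 d2
instance (i : Int) (d1 : List Int) (d2 : List Int) (out : Int) : Decidable (Spec_compare_same i d1 d2 out) := by unfold Spec_compare_same; infer_instance

-- ===== CLAIM (what is proved, stated in full; the proofs are below) =====
def Claim_equal_compare_same : Prop := ∀ (i : Int) (d1 : List Int) (d2 : List Int), Dom_compare_same i d1 d2 → Pre_compare_same i d1 d2 → Spec_compare_same i d1 d2 (compare_same i d1 d2)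

-- ===== LEMMAS AND PROOFS =====

-- ===== VERDICT (by name: the statement is the Claim_ definition above) =====
theorem compare_same_spec : Claim_equal_compare_same := by
  intro i d1 d2 _ hpre
  obtain ⟨h1, h2, h3⟩ := hpre
  unfold Spec_compare_same compare_same compare_same_alt
  cases e1 : PySem.List.pyGet? d1 i with
  | none => simp [e1] at h1
  | some a =>
  cases e2 : PySem.List.pyGet? d2 i with
  | none => simp [e2] at h2
  | some b =>
  by_cases hab : a = b
  · subst hab
    have hnext := h3 (by rw [e1, e2])
    cases e3 : PySem.List.pyGet? d1 (i + 1) with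
    | none => simp [e3] at hnext
    | some c =>
    cases e4 : PySem.List.pyGet? d2 (i + 1) with
    | none => exact absurd ((h3 (by rw [e1, e2])).2) (by simp [e4])
    | some d =>
    by_cases hcd : c = d
    · subst hcd
      simp [compareGoA, e1, e2, e3, e4]
    · -- A recurses once; the inner call returns at its first comparison since c ≠ d
      have hfuel : d1.length + 2 = (d1.length + 1) + 1 := rfl
      rw [hfuel]
      simp only [compareGoA, e1, e2, e3, e4]
      have hfuel2 : d1.length + 1 = d1.length + 1 := rfl
      cases hl : d1.length with
      | zero =>
        -- d1 nonempty since pyGet? d1 i = some _, so length ≠ 0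
        exfalso
        have : d1 = [] := List.length_eq_zero_iff.mp hl
        subst this
        simp [PySem.List.pyGet?, PySem.List.pyIdx?] at e1
      | succ n =>
        simp only [compareGoA]
        rcases lt_trichotomy c d with h | h | h
        · simp [h, hcd]
        · exact absurd h hcd
        · simp [hcd, not_lt_of_gt h, h]
  · rcases lt_trichotomy a b with h | h | h
    · simp [compareGoA, e1, e2, h, hab]
    · exact absurd h hab
    · simp [compareGoA, e1, e2, hab, not_lt_of_gt h, h]
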